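-- pv_equiv track=rewrite | github.com/RohanIBN/durgasteel | generate_theme.py | render_stepper
-- ===== SOURCE A (Python) =====
-- steps = [
--     ("Need", "procurement-need.html"),
--     ("Vendor", "vendor.html"),
--     ("PO", "po.html"),
--     ("GRN", "grn.html"),
--     ("QC", "qc-rm.html"),
--     ("RM", "inventory-rm.html"),
--     ("Product", "product-master.html"),
--     ("Inquiry", "inquiry.html"),
--     ("SO", "sales-order.html"),
--     ("MRP", "mrp.html"),
--     ("Production", "production.html"),
--     ("FG", "inventory-fg.html"),
--     ("Allocation", "allocation.html"),
--     ("Dispatch", "dispatch.html"),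
--     ("Billing", "billing.html"),
--     ("Delivery", "delivery.html"),
-- ]
--
-- def render_stepper(current_file: str) -> str:
--     if current_file not in [f for _, f in steps]:
--         current_file = steps[0][1]
--     idx = [f for _, f in steps].index(current_file)
--     out = []
--     for i, (label, file) in enumerate(steps):
--         cls = "done" if i < idx else ("current" if i == idx else "pending")
--         out.append(f'<a class="workflow-step {cls}" href="{file}">{label}</a>')
--     return "".join(out)
-- ===== SOURCE B (Python) =====
-- steps = [
--     ("Need", "procurement-need.html"),
--     ("Vendor", "vendor.html"),
--     ("PO", "po.html"),
--     ("GRN", "grn.html"),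
--     ("QC", "qc-rm.html"),
--     ("RM", "inventory-rm.html"),
--     ("Product", "product-master.html"),
--     ("Inquiry", "inquiry.html"),
--     ("SO", "sales-order.html"),
--     ("MRP", "mrp.html"),
--     ("Production", "production.html"),
--     ("FG", "inventory-fg.html"),
--     ("Allocation", "allocation.html"),
--     ("Dispatch", "dispatch.html"),
--     ("Billing", "billing.html"),
--     ("Delivery", "delivery.html"),
-- ]
--
-- def render_stepper(current_file: str) -> str:
--     # single pass with a running flag instead of .index + position compare
--     if all(f != current_file for _, f in steps):
--         current_file = steps[0][1]
--     parts = []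
--     found = False
--     for label, file in steps:
--         if found:
--             cls = "pending"
--         elif file == current_file:
--             cls = "current"
--             found = True
--         else:
--             cls = "done"
--         parts.append(f'<a class="workflow-step {cls}" href="{file}">{label}</a>')
--     return "".join(parts)
-- ===== Notes on version B (the rewrite author's own statement) =====
-- stated objective: simpler
-- what changed: Replaces the .index lookup plus per-step position comparison with a single pass over steps that carries a running boolean flag to choose done/current/pending.
import Mathlib
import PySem

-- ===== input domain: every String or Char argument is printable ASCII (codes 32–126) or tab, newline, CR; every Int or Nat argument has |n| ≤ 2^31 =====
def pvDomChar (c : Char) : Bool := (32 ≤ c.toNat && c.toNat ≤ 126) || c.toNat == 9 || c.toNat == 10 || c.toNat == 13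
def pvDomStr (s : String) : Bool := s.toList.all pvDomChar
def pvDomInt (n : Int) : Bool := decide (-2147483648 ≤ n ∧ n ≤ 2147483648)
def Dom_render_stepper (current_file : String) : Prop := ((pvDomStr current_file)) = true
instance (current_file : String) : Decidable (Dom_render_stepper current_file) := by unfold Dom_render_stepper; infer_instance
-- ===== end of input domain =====

-- B replaces A's .index-then-compare-positions with a single pass carrying a running boolean flag (simpler, same cost class).

def pvSteps : List (String × String) :=
  [("Need", "procurement-need.html"),
   ("Vendor", "vendor.html"),
   ("PO", "po.html"),
   ("GRN", "grn.html"),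
   ("QC", "qc-rm.html"),
   ("RM", "inventory-rm.html"),
   ("Product", "product-master.html"),
   ("Inquiry", "inquiry.html"),
   ("SO", "sales-order.html"),
   ("MRP", "mrp.html"),
   ("Production", "production.html"),
   ("FG", "inventory-fg.html"),
   ("Allocation", "allocation.html"),
   ("Dispatch", "dispatch.html"),
   ("Billing", "billing.html"),
   ("Delivery", "delivery.html")]

-- the f-string '<a class="workflow-step {cls}" href="{file}">{label}</a>' (identical in A and B)
def pvAnchor (cls file label : String) : String :=
  PySem.Str.join "" ["<a class=\"workflow-step ", cls, "\" href=\"", file, "\">", label, "</a>"]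

-- ===== PORT A =====
def render_stepper (current_file : String) : String :=
  let files := pvSteps.map (fun p => p.2)
  let cf := if files.contains current_file then current_file else (pvSteps.getD 0 ("", "")).2
  -- the guard guarantees membership, so Python's .index cannot raise; getD 0 is unreachable
  let idx : Int := ((PySem.List.index? files cf).getD 0 : Nat)
  let out := (PySem.List.enumerate pvSteps).map (fun ip =>
    pvAnchor (if ip.1 < idx then "done" else if ip.1 = idx then "current" else "pending") ip.2.2 ip.2.1)
  PySem.Str.join "" out

-- ===== PORT B =====
def render_stepper_alt (current_file : String) : String :=
  let cf := if pvSteps.all (fun p => p.2 != current_file) then (pvSteps.getD 0 ("", "")).2 else current_file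
  let r := pvSteps.foldl (fun (a : List String × Bool) p =>
    (a.1 ++ [pvAnchor (if a.2 then "pending" else if p.2 == cf then "current" else "done") p.2 p.1],
     a.2 || (!a.2 && p.2 == cf))) ([], false)
  PySem.Str.join "" r.1

-- ===== PRECONDITION & SPEC =====
def Spec_render_stepper (current_file : String) (out : String) : Prop := out = render_stepper_alt current_file
instance (current_file : String) (out : String) : Decidable (Spec_render_stepper current_file out) := by unfold Spec_render_stepper; infer_instance

-- ===== CLAIM (what is proved, stated in full; the proofs are below) =====
def Claim_equal_render_stepper : Prop := ∀ (current_file : String), Dom_render_stepper current_file → Spec_render_stepper current_file (render_stepper current_file)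

-- ===== LEMMAS AND PROOFS =====

-- B's flag-carrying fold produces exactly A's position-compare rendering, for any step list:
-- the boolean accumulator corresponds to 'the running position s has passed idx'.
theorem pvCore (cf : String) (idx : Int) (l : List (String × String)) (s : Int) (found : Bool)
    (acc : List String)
    (h : if found then idx < s
         else cf ∈ l.map (fun p => p.2) ∧ idx = s + ((l.map (fun p => p.2)).idxOf cf : Nat)) :
    (l.foldl (fun (a : List String × Bool) p =>
      (a.1 ++ [pvAnchor (if a.2 then "pending" else if p.2 == cf then "current" else "done") p.2 p.1],
       a.2 || (!a.2 && p.2 == cf))) (acc, found)).1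
    = acc ++ (PySem.List.enumerate l s).map (fun ip =>
        pvAnchor (if ip.1 < idx then "done" else if ip.1 = idx then "current" else "pending") ip.2.2 ip.2.1) := by
  induction l generalizing s found acc with
  | nil =>
    simp [PySem.List.enumerate_nil]
  | cons c rest ih =>
    rw [List.foldl_cons, PySem.List.enumerate_cons, List.map_cons]
    cases found with
    | true =>
      simp only [if_true] at h
      have h1 : ¬ ((s : Int) < idx) := by omega
      have h2 : ¬ ((s : Int) = idx) := by omega
      dsimp only
      simp only [Bool.true_or, Bool.not_true, Bool.false_and, reduceIte]
      rw [ih (s + 1) true _ (by simp only [if_true]; omega)]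
      simp [h1, h2]
    | false =>
      simp only [Bool.false_eq_true, if_false, List.map_cons, List.mem_cons] at h
      obtain ⟨hmem, hidx⟩ := h
      by_cases hc : c.2 = cf
      · have hbeq : (c.2 == cf) = true := by simp [hc]
        have hidx0 : idx = s := by
          rw [List.idxOf_cons, hbeq] at hidx; simp at hidx; omega
        have h1 : ¬ (s < idx) := by omega
        dsimp only
        rw [hbeq]
        simp only [Bool.false_or, Bool.not_false, Bool.true_and, reduceIte]
        rw [ih (s + 1) true _ (by simp only [if_true]; omega)]
        simp [hidx0]
      · have hbeq : (c.2 == cf) = false := by simp [hc]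
        have hmem' : cf ∈ rest.map (fun p => p.2) := by
          rcases hmem with h | h
          · exact absurd h.symm hc
          · exact h
        have hidx' : idx = (s + 1) + (((rest.map (fun p => p.2)).idxOf cf : Nat)) := by
          rw [List.idxOf_cons, hbeq] at hidx
          simp only [cond_false] at hidx
          omega
        have h1 : s < idx := by
          have : (0 : Int) ≤ ((rest.map (fun p => p.2)).idxOf cf : Nat) := Int.natCast_nonneg _
          omega
        have h2 : ¬ (s = idx) := by omega
        dsimp only
        rw [hbeq]
        simp only [Bool.false_or, Bool.not_false, Bool.and_false]
        rw [ih (s + 1) false _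
          (by simp only [Bool.false_eq_true, if_false]; exact ⟨hmem', hidx'⟩)]
        simp [h1]

-- the two guards are complementary: all(f != cf) ↔ cf is not a member of the file list
theorem pvAllNe (l : List (String × String)) (c : String) :
    l.all (fun p => p.2 != c) = !decide (c ∈ l.map (fun p => p.2)) := by
  induction l with
  | nil => simp
  | cons x xs ih =>
    by_cases hxc : c = x.2
    · simp [hxc]
    · have h2 : (x.2 == c) = false := beq_eq_false_iff_ne.mpr (Ne.symm hxc)
      simp only [List.all_cons, bne, h2, Bool.not_false, Bool.true_and]
      simp only [bne] at ih
      rw [ih]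
      simp [List.mem_cons, hxc]

theorem pvIdxOf? (l : List String) (c : String) (h : c ∈ l) :
    List.idxOf? c l = some (l.idxOf c) := by
  induction l with
  | nil => simp at h
  | cons x xs ih =>
    rw [List.idxOf?_cons, List.idxOf_cons]
    by_cases hx : x == c
    · simp [hx]
    · simp only [List.mem_cons] at h
      rcases h with h | h
      · subst h; simp at hx
      · simp [hx, ih h]

-- A = B whenever the (possibly replaced) current file is a member of the file list
theorem pvBoth (cf : String) (hm : cf ∈ pvSteps.map (fun p => p.2)) :
    render_stepper cf = render_stepper_alt cf := by
  rw [render_stepper, render_stepper_alt]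
  have hcont : (pvSteps.map (fun p => p.2)).contains cf = true := by simpa using hm
  have hall : pvSteps.all (fun p => p.2 != cf) = false := by
    rw [pvAllNe]; simp [hm]
  rw [hcont, hall]
  simp only [if_true, Bool.false_eq_true, if_false]
  have hidx : PySem.List.index? (pvSteps.map (fun p => p.2)) cf
      = some ((pvSteps.map (fun p => p.2)).idxOf cf) := by
    rw [PySem.List.index?_eq_idxOf?]
    exact pvIdxOf? _ _ hm
  rw [hidx]
  rw [pvCore cf (((pvSteps.map (fun p => p.2)).idxOf cf : Nat) : Int) pvSteps 0 false []
    (by simp only [Bool.false_eq_true, if_false]; exact ⟨hm, by omega⟩)]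
  rfl

-- ===== VERDICT (by name: the statement is the Claim_ definition above) =====
theorem render_stepper_spec : Claim_equal_render_stepper := by
  intro cf _
  show render_stepper cf = render_stepper_alt cf
  by_cases hm : cf ∈ pvSteps.map (fun p => p.2)
  · exact pvBoth cf hm
  · have hcont : (pvSteps.map (fun p => p.2)).contains cf = false := by simpa using hm
    have hall : pvSteps.all (fun p => p.2 != cf) = true := by
      rw [pvAllNe]; simp [hm]
    have h0 : ("procurement-need.html" : String) ∈ pvSteps.map (fun p => p.2) := by
      simp [pvSteps]
    have hboth := pvBoth "procurement-need.html" h0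
    have hcont0 : (pvSteps.map (fun p => p.2)).contains ("procurement-need.html" : String) = true := by
      simpa using h0
    have hall0 : pvSteps.all (fun p => p.2 != "procurement-need.html") = false := by
      rw [pvAllNe]; simp [h0]
    rw [render_stepper, render_stepper_alt] at hboth ⊢
    rw [hcont, hall]
    rw [hcont0, hall0] at hboth
    simp only [Bool.false_eq_true, if_false, if_true] at hboth ⊢
    exact hboth
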